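-- pv_equiv track=rewrite | github.com/zhusq20/reasoning-evals | simple-evals/sc.py | find_max_x
-- ===== SOURCE A (Python) =====
-- def find_max_x(L, M):
--     # Initialize the binary search bounds
--     left, right = 0, max(L)
--
--     while left < right:
--         mid = (left + right + 1) // 2
--         # Calculate the sum of the list with all elements greater than mid replaced by mid
--         current_sum = sum(min(x, mid) for x in L)
--
--         if current_sum < M:
--             left = mid  # mid is a valid candidate, try for a larger X
--         else:
--             right = mid - 1  # mid is too large, try a smaller X
--
--     return left
-- ===== SOURCE B (Python) =====
-- def find_max_x(L, M):
--     # Sort once and sweep the piecewise-linear clamp-sum segments directly.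
--     hi = max(L)
--     if hi <= 0:
--         return 0
--     s = sorted(L)
--     n = len(s)
--     best = 0
--     pref = 0
--     lo = 0
--     for i, v in enumerate(s):
--         if v <= 0 or v <= lo:
--             pref += v
--             continue
--         # segment [lo, min(v, hi)]: clamp-sum(x) = pref + x * (n - i)
--         nb = min(v, hi)
--         m = n - i
--         xmax = (M - pref - 1) // m
--         if xmax >= lo:
--             best = min(xmax, nb)
--         lo = nb + 1
--         if lo > hi:
--             break
--         pref += v
--     if lo <= hi and pref < M:
--         # above every element: clamp-sum is constant = sum(L) = pref
--         best = hi
--     return best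
-- ===== Notes on version B (the rewrite author's own statement) =====
-- stated objective: faster
-- what changed: Replaced the binary search (which recomputes the full clamped sum, an O(n) pass, each iteration) by sort + one sweep over the piecewise-linear segments of the clamp-sum, solving each linear piece in closed form.
import Mathlib
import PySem

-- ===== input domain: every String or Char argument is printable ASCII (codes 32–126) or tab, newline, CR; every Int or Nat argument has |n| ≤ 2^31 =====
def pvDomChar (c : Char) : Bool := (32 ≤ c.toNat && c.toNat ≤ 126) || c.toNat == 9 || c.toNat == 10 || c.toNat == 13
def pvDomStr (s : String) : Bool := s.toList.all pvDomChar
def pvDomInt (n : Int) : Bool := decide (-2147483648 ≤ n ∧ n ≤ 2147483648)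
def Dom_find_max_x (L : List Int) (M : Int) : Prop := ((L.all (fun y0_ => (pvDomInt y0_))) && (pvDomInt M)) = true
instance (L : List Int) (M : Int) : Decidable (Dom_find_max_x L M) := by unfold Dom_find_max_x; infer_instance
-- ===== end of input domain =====

-- B replaces A's binary search (a full clamped-sum pass per probe) by sort + one sweep solving each
-- linear segment of the clamp-sum in closed form; objective: faster.

-- ===== PORT A =====
-- while left < right: probe mid, recompute the clamped sum over all of L
def pvALoop (L : List Int) (M left right : Int) : Int :=
  if h : left < right then
    let mid := PySem.Int.floordiv (left + right + 1) 2
    let current_sum := (L.map (fun x => min x mid)).sum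
    if current_sum < M then pvALoop L M mid right else pvALoop L M left (mid - 1)
  else left
termination_by (right - left).toNat
decreasing_by
  all_goals
  · have hb := PySem.Int.floordiv_two_mid_bounds (lo := left + 1) (hi := right) (by omega)
    have he : left + 1 + right = left + right + 1 := by ring
    rw [he] at hb
    omega

def find_max_x (L : List Int) (M : Int) : Int :=
  match PySem.List.max? L (fun y => y) with
  | some r => pvALoop L M 0 r
  | none => 0  -- Python raises ValueError on max([]); excluded by Pre_

-- ===== PORT B =====
-- one sweep over the sorted list: each gap up to the next distinct positive value is a linear
-- segment of the clamp-sum, solved in closed form by one floor division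
def pvBGo (M hi : Int) (n : Nat) (s : List Int) (i : Nat) (pref lo best : Int) : Int :=
  match s with
  | [] => if lo ≤ hi ∧ pref < M then hi else best
  | v :: rest =>
    if v ≤ 0 ∨ v ≤ lo then pvBGo M hi n rest (i + 1) (pref + v) lo best
    else
      let nb := min v hi
      let m : Int := ((n - i : Nat) : Int)
      let xmax := PySem.Int.floordiv (M - pref - 1) m
      let best' := if xmax ≥ lo then min xmax nb else best
      if nb + 1 > hi then best'
      else pvBGo M hi n rest (i + 1) (pref + v) (nb + 1) best'

def find_max_x_alt (L : List Int) (M : Int) : Int :=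
  match PySem.List.max? L (fun y => y) with
  | none => 0  -- Python raises ValueError on max([]); excluded by Pre_
  | some hi =>
    if hi ≤ 0 then 0
    else
      let s := PySem.List.sorted L (fun y => y) false
      pvBGo M hi s.length s 0 0 0 0

-- ===== PRECONDITION & SPEC =====
-- Pre_ excludes only the empty list, on which Python's max([]) raises ValueError in both A and B.
def Pre_find_max_x (L : List Int) (M : Int) : Prop := L ≠ []
instance (L : List Int) (M : Int) : Decidable (Pre_find_max_x L M) := by unfold Pre_find_max_x; infer_instance
def pvWitness_find_max_x : List Int × Int := ([3, 1, -2], 4)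

def Spec_find_max_x (L : List Int) (M : Int) (out : Int) : Prop := out = find_max_x_alt L M
instance (L : List Int) (M : Int) (out : Int) : Decidable (Spec_find_max_x L M out) := by unfold Spec_find_max_x; infer_instance

-- ===== CLAIM (what is proved, stated in full; the proofs are below) =====
def Claim_equal_find_max_x : Prop := ∀ (L : List Int) (M : Int), Dom_find_max_x L M → Pre_find_max_x L M → Spec_find_max_x L M (find_max_x L M)

-- ===== LEMMAS AND PROOFS =====

-- the clamped sum both programs reason about
def pvCS (L : List Int) (x : Int) : Int := (L.map (fun e => min e x)).sum

-- the common characterisation: res is the largest x in [0, hi] with pvCS L x < M, or 0 if none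
def pvIsAns (L : List Int) (M hi res : Int) : Prop :=
  0 ≤ res ∧ res ≤ hi ∧ (∀ x, res < x → x ≤ hi → M ≤ pvCS L x) ∧ (res = 0 ∨ pvCS L res < M)

lemma pvCS_mono (L : List Int) {x y : Int} (h : x ≤ y) : pvCS L x ≤ pvCS L y := by
  induction L with
  | nil => simp [pvCS]
  | cons a t ih => simp only [pvCS, List.map_cons, List.sum_cons] at *; omega

lemma pvCS_perm {L L' : List Int} (h : L.Perm L') (x : Int) : pvCS L x = pvCS L' x :=
  List.Perm.sum_eq (h.map _)

lemma pvCS_append (t1 t2 : List Int) (x : Int) :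
    pvCS (t1 ++ t2) x = pvCS t1 x + pvCS t2 x := by
  simp [pvCS]

lemma pvCS_all_le {t : List Int} {x : Int} (h : ∀ u ∈ t, u ≤ x) : pvCS t x = t.sum := by
  induction t with
  | nil => simp [pvCS]
  | cons a r ih =>
    have ha := h a (by simp)
    simp only [pvCS, List.map_cons, List.sum_cons] at *
    rw [ih (fun u hu => h u (by simp [hu]))]
    omega

lemma pvCS_all_ge {t : List Int} {x : Int} (h : ∀ u ∈ t, x ≤ u) : pvCS t x = x * t.length := by
  induction t with
  | nil => simp [pvCS]
  | cons a r ih =>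
    have ha := h a (by simp)
    simp only [pvCS, List.map_cons, List.sum_cons, List.length_cons] at *
    rw [ih (fun u hu => h u (by simp [hu]))]
    have hm : min a x = x := by omega
    rw [hm]; push_cast; ring

-- clamp-sum split at index i: the prefix contributes itself, the tail contributes x each
lemma pvCS_split (t : List Int) (i : Nat) (x : Int)
    (h1 : ∀ u ∈ t.take i, u ≤ x) (h2 : ∀ w ∈ t.drop i, x ≤ w) :
    pvCS t x = (t.take i).sum + x * (t.length - i : Nat) := by
  conv_lhs => rw [← List.take_append_drop i t]
  rw [pvCS_append, pvCS_all_le h1, pvCS_all_ge h2, List.length_drop]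

lemma pvIsAns_unique {L : List Int} {M hi r1 r2 : Int}
    (h1 : pvIsAns L M hi r1) (h2 : pvIsAns L M hi r2) : r1 = r2 := by
  obtain ⟨a1, b1, c1, d1⟩ := h1
  obtain ⟨a2, b2, c2, d2⟩ := h2
  by_contra hne
  rcases lt_or_gt_of_ne hne with hlt | hlt
  · have := c1 r2 hlt b2
    rcases d2 with h0 | hP
    · omega
    · omega
  · have := c2 r1 hlt b1
    rcases d1 with h0 | hP
    · omega
    · omega

-- A's binary search returns the greatest valid x in [l, r], or l if none
lemma pvALoop_good (L : List Int) (M : Int) :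
    ∀ (k : Nat) (l r : Int), (r - l).toNat ≤ k → 0 ≤ l → l ≤ r →
      l ≤ pvALoop L M l r ∧ pvALoop L M l r ≤ r ∧
      (∀ x, pvALoop L M l r < x → x ≤ r → M ≤ pvCS L x) ∧
      (pvALoop L M l r = l ∨ pvCS L (pvALoop L M l r) < M) := by
  intro k
  induction k with
  | zero =>
    intro l r hk h0 hlr
    have : l = r := by omega
    subst this
    rw [pvALoop]; simp; omega
  | succ k ih =>
    intro l r hk h0 hlr
    by_cases h : l < r
    · have hb := PySem.Int.floordiv_two_mid_bounds (lo := l + 1) (hi := r) (by omega)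
      have he : l + 1 + r = l + r + 1 := by ring
      rw [he] at hb
      rw [pvALoop]
      simp only [dif_pos h]
      set mid := PySem.Int.floordiv (l + r + 1) 2 with hmid
      by_cases hc : (L.map (fun x => min x mid)).sum < M
      · simp only [if_pos hc]
        obtain ⟨a, b, c, d⟩ := ih mid r (by omega) (by omega) (by omega)
        refine ⟨by omega, b, c, ?_⟩
        rcases d with d | d
        · right; rw [d]; exact hc
        · right; exact d
      · simp only [if_neg hc]
        obtain ⟨a, b, c, d⟩ := ih l (mid - 1) (by omega) h0 (by omega)
        refine ⟨a, by omega, ?_, d⟩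
        intro x hx hxr
        by_cases hxm : x ≤ mid - 1
        · exact c x hx hxm
        · have hmx : pvCS L mid ≤ pvCS L x := pvCS_mono L (by omega)
          have : M ≤ pvCS L mid := by
            simp only [pvCS] at *
            omega
          omega
    · have : l = r := by omega
      subst this
      rw [pvALoop]; simp; omega

-- B's sweep returns the greatest valid x in [0, hi], or 0 if none
lemma pvBGo_good (M hi : Int) (t : List Int) (hsort : t.Pairwise (· ≤ ·)) (hhi : 1 ≤ hi) :
    ∀ (k i : Nat) (pref lo best : Int),
      t.length - i ≤ k →
      i ≤ t.length →
      pref = (t.take i).sum →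
      (∀ u ∈ t.take i, u ≤ lo) →
      0 ≤ lo → lo ≤ hi →
      0 ≤ best → best ≤ hi →
      (best = 0 ∨ pvCS t best < M) →
      (∀ x, best < x → x < lo → M ≤ pvCS t x) →
      pvIsAns t M hi (pvBGo M hi t.length (t.drop i) i pref lo best) := by
  intro k
  induction k with
  | zero =>
    intro i pref lo best hk hi_le hpref htake h0lo hlohi h0b hbhi hbP hbmax
    have hie : i = t.length := by omega
    have hdrop : t.drop i = [] := by rw [hie]; simp
    have htk : t.take i = t := by rw [hie]; simp
    rw [hdrop, pvBGo]
    by_cases hc : lo ≤ hi ∧ pref < M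
    · simp only [if_pos hc]
      refine ⟨by omega, le_refl _, by omega, Or.inr ?_⟩
      have : pvCS t hi = t.sum := pvCS_all_le (fun u hu => by
        have := htake u (by rw [htk]; exact hu); omega)
      rw [this, ← htk, ← hpref]; exact hc.2
    · simp only [if_neg hc]
      refine ⟨h0b, hbhi, ?_, hbP⟩
      intro x hx hxhi
      by_cases hxlo : x < lo
      · exact hbmax x hx hxlo
      · have : pvCS t x = t.sum := pvCS_all_le (fun u hu => by
          have := htake u (by rw [htk]; exact hu); omega)
        rw [this, ← htk, ← hpref]
        omega
  | succ k ih =>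
    intro i pref lo best hk hi_le hpref htake h0lo hlohi h0b hbhi hbP hbmax
    match hdrop : t.drop i with
    | [] =>
      have hie : i = t.length := by
        by_contra hne
        have : i < t.length := by omega
        have := List.drop_eq_nil_iff.mp hdrop
        omega
      have htk : t.take i = t := by rw [hie]; simp
      rw [pvBGo]
      by_cases hc : lo ≤ hi ∧ pref < M
      · simp only [if_pos hc]
        refine ⟨by omega, le_refl _, by omega, Or.inr ?_⟩
        have : pvCS t hi = t.sum := pvCS_all_le (fun u hu => by
          have := htake u (by rw [htk]; exact hu); omega)
        rw [this, ← htk, ← hpref]; exact hc.2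
      · simp only [if_neg hc]
        refine ⟨h0b, hbhi, ?_, hbP⟩
        intro x hx hxhi
        by_cases hxlo : x < lo
        · exact hbmax x hx hxlo
        · have : pvCS t x = t.sum := pvCS_all_le (fun u hu => by
            have := htake u (by rw [htk]; exact hu); omega)
          rw [this, ← htk, ← hpref]
          omega
    | v :: rest =>
      have hilt : i < t.length := by
        by_contra hne
        have : t.drop i = [] := List.drop_eq_nil_iff.mpr (by omega)
        rw [this] at hdrop; exact (List.cons_ne_nil v rest) hdrop.symm
      have hrest : rest = t.drop (i + 1) := by
        have := congrArg List.tail hdrop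
        simpa [List.tail_drop] using this.symm
      have hgv : t[i]? = some v := by
        have : (t.drop i).head? = t[i]? := by
          simp [List.head?_drop]
        rw [hdrop] at this; simpa using this.symm
      have htake1 : t.take (i + 1) = t.take i ++ [v] := by
        rw [List.take_succ, hgv]; rfl
      -- every element of the drop is ≥ v
      have hge : ∀ w ∈ t.drop i, v ≤ w := by
        intro w hw
        have hp : (t.drop i).Pairwise (· ≤ ·) := hsort.drop
        rw [hdrop] at hp hw
        rcases List.mem_cons.mp hw with hw1 | hw1
        · simp [hw1]
        · exact (List.pairwise_cons.mp hp).1 w hw1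
      rw [pvBGo]
      by_cases hv : v ≤ 0 ∨ v ≤ lo
      · simp only [if_pos hv]
        have h2 := ih (i + 1) (pref + v) lo best (by omega) (by omega)
          (by rw [htake1, List.sum_append, hpref]; simp)
          (by intro u hu; rw [htake1] at hu; rcases List.mem_append.mp hu with h | h
              · exact htake u h
              · simp at h; omega)
          h0lo hlohi h0b hbhi hbP hbmax
        rw [← hrest] at h2
        exact h2
      · simp only [if_neg hv]
        push_neg at hv
        obtain ⟨hv0, hvlo⟩ := hv
        set nb := min v hi with hnb
        have hnblo : lo ≤ nb := by omega
        have hnbhi : nb ≤ hi := by omega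
        have hm0 : (0:Int) < ((t.length - i : Nat) : Int) := by
          have : 0 < t.length - i := by omega
          exact_mod_cast this
        set m : Int := ((t.length - i : Nat) : Int) with hm
        set xmax := PySem.Int.floordiv (M - pref - 1) m with hxmax
        -- on the segment [lo, nb] the clamp-sum is pref + x * m
        have hseg : ∀ x, lo ≤ x → x ≤ nb → pvCS t x = pref + x * m := by
          intro x hx1 hx2
          rw [pvCS_split t i x
            (fun u hu => by have := htake u hu; omega)
            (fun w hw => by have := hge w hw; omega), ← hpref]
        have hxiff : ∀ q : Int, q ≤ xmax ↔ q * m ≤ M - pref - 1 := by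
          intro q; exact PySem.Int.le_floordiv_iff_mul_le hm0
        -- validity on the segment in terms of xmax
        have hvalid : ∀ x, lo ≤ x → x ≤ nb → (pvCS t x < M ↔ x ≤ xmax) := by
          intro x hx1 hx2
          rw [hseg x hx1 hx2, hxiff]
          omega
        by_cases hx : xmax ≥ lo
        · simp only [if_pos hx]
          set best' := min xmax nb with hbest'
          have hb'lo : lo ≤ best' := by omega
          have hb'nb : best' ≤ nb := by omega
          have hPb' : pvCS t best' < M := by
            rw [hvalid best' hb'lo hb'nb]; omega
          have hmax' : ∀ x, best' < x → x < nb + 1 → M ≤ pvCS t x := by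
            intro x hx1 hx2
            have hxlo : lo ≤ x := by omega
            have := hvalid x hxlo (by omega)
            have hgt : ¬ (x ≤ xmax) := by omega
            omega
          by_cases hbr : nb + 1 > hi
          · simp only [if_pos hbr]
            exact ⟨by omega, by omega, fun x h1 h2 => hmax' x h1 (by omega), Or.inr hPb'⟩
          · simp only [if_neg hbr]
            have hvnb : nb = v := by omega
            have h2 := ih (i + 1) (pref + v) (nb + 1) best' (by omega) (by omega)
              (by rw [htake1, List.sum_append, hpref]; simp)
              (by intro u hu; rw [htake1] at hu; rcases List.mem_append.mp hu with h | h
                  · have := htake u h; omega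
                  · simp at h; omega)
              (by omega) (by omega) (by omega) (by omega) (Or.inr hPb')
              (by intro x h1 h2; exact hmax' x h1 h2)
            rw [← hrest] at h2
            exact h2
        · simp only [if_neg hx]
          push_neg at hx
          have hmax' : ∀ x, best < x → x < nb + 1 → M ≤ pvCS t x := by
            intro x hx1 hx2
            by_cases hxlo : x < lo
            · exact hbmax x hx1 hxlo
            · have h3 := hvalid x (by omega) (by omega)
              have : ¬ (x ≤ xmax) := by omega
              omega
          by_cases hbr : nb + 1 > hi
          · simp only [if_pos hbr]
            exact ⟨h0b, hbhi, fun x h1 h2 => hmax' x h1 (by omega), hbP⟩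
          · simp only [if_neg hbr]
            have hvnb : nb = v := by omega
            have h2 := ih (i + 1) (pref + v) (nb + 1) best (by omega) (by omega)
              (by rw [htake1, List.sum_append, hpref]; simp)
              (by intro u hu; rw [htake1] at hu; rcases List.mem_append.mp hu with h | h
                  · have := htake u h; omega
                  · simp at h; omega)
              (by omega) (by omega) h0b hbhi hbP
              (by intro x h1 h2; exact hmax' x h1 h2)
            rw [← hrest] at h2
            exact h2

-- ===== VERDICT (by name: the statement is the Claim_ definition above) =====
theorem find_max_x_spec : Claim_equal_find_max_x := by
  intro L M _ hpre
  unfold Spec_find_max_x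
  obtain ⟨hi, hmax⟩ : ∃ hi, PySem.List.max? L (fun y => y) = some hi := by
    cases h : PySem.List.max? L (fun y => y) with
    | none => exact absurd ((PySem.List.max?_eq_none_iff L _).mp h) hpre
    | some r => exact ⟨r, rfl⟩
  unfold find_max_x find_max_x_alt
  rw [hmax]
  by_cases hhi : hi ≤ 0
  · simp only [if_pos hhi]
    rw [pvALoop]
    simp only [dif_neg (show ¬ ((0:Int) < hi) by omega)]
  · simp only [if_neg hhi]
    set t := PySem.List.sorted L (fun y => y) false with ht
    have hperm : t.Perm L := PySem.List.sorted_perm L _ _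
    have hpair : t.Pairwise (· ≤ ·) := PySem.List.sorted_pairwise L (fun y => y)
    obtain ⟨a1, b1, c1, d1⟩ := pvALoop_good L M (hi - 0).toNat 0 hi le_rfl le_rfl (by omega)
    have hAans : pvIsAns L M hi (pvALoop L M 0 hi) := ⟨a1, b1, c1, d1⟩
    have hB := pvBGo_good M hi t hpair (by omega) t.length 0 0 0 0 (by omega) (by omega)
      (by simp) (by simp) le_rfl (by omega) le_rfl (by omega) (Or.inl rfl)
      (by intro x h1 h2; omega)
    rw [List.drop_zero] at hB
    have hcs : ∀ x, pvCS t x = pvCS L x := fun x => pvCS_perm hperm x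
    have hBans : pvIsAns L M hi (pvBGo M hi t.length t 0 0 0 0) := by
      obtain ⟨a, b, c, d⟩ := hB
      refine ⟨a, b, fun x h1 h2 => (hcs x) ▸ c x h1 h2, ?_⟩
      rcases d with d | d
      · exact Or.inl d
      · exact Or.inr ((hcs _) ▸ d)
    exact pvIsAns_unique hAans hBans
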